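-- pv_equiv track=rewrite | github.com/Ritesh7767/dataStructure | sliding.py | clearDigits
-- ===== SOURCE A (Python) =====
-- def clearDigits(string):
--
--     stack = []
--
--     for char in string:
--         if ord(char) >= 48 and ord(char) <= 57:
--             if stack:
--                 stack.pop()
--         else:
--             stack.append(char)
--
--     return "".join(stack)
-- ===== SOURCE B (Python) =====
-- def clearDigits(string):
--     pending = 0
--     survivors = []
--     for char in reversed(string):
--         if 48 <= ord(char) <= 57:
--             pending += 1
--         elif pending > 0:
--             pending -= 1
--         else:
--             survivors.append(char)
--     survivors.reverse()
--     return "".join(survivors)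
-- ===== Notes on version B (the rewrite author's own statement) =====
-- stated objective: alternative
-- what changed: Scans the string right-to-left keeping only an integer count of pending digits instead of a character stack with pops; survivors are collected and reversed at the end.
import Mathlib
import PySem

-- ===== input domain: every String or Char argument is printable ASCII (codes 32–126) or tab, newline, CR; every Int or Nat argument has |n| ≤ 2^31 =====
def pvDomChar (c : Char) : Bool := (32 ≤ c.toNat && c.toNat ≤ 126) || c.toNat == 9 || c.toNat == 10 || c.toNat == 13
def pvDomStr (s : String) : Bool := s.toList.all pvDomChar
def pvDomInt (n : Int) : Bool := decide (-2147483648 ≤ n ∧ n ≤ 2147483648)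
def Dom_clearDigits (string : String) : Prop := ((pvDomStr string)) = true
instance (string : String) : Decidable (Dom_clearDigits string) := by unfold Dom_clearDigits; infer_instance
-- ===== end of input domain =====

-- B replaces A's character stack (with guarded pops) by a right-to-left scan that
-- keeps only a count of pending digits; an alternative decomposition, same cost.

-- ===== PORT A =====
-- left-to-right fold; stack is a list in bottom-to-top order: append pushes, dropLast pops
def clearDigits (string : String) : String :=
  let stack := string.toList.foldl
    (fun stack char =>
      if 48 ≤ char.toNat ∧ char.toNat ≤ 57 then
        if stack ≠ [] then stack.dropLast else stack
      else stack ++ [char]) []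
  String.ofList stack

-- ===== PORT B =====
-- fold over the reversed characters with state (pending digits, survivors in scan order);
-- survivors are reversed at the end, as in Source B
def clearDigits_alt (string : String) : String :=
  let res := string.toList.reverse.foldl
    (fun (st : Nat × List Char) char =>
      if 48 ≤ char.toNat ∧ char.toNat ≤ 57 then (st.1 + 1, st.2)
      else if st.1 > 0 then (st.1 - 1, st.2)
      else (st.1, st.2 ++ [char])) (0, [])
  String.ofList res.2.reverse

-- ===== PRECONDITION & SPEC =====
def Spec_clearDigits (string : String) (out : String) : Prop := out = clearDigits_alt string
instance (string : String) (out : String) : Decidable (Spec_clearDigits string out) := by unfold Spec_clearDigits; infer_instance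

-- ===== CLAIM (what is proved, stated in full; the proofs are below) =====
def Claim_equal_clearDigits : Prop := ∀ (string : String), Dom_clearDigits string → Spec_clearDigits string (clearDigits string)

-- ===== LEMMAS AND PROOFS =====

-- A's step and B's fold, named for the proofs (definitionally the ports' lambdas)
def pvStepA (stack : List Char) (char : Char) : List Char :=
  if 48 ≤ char.toNat ∧ char.toNat ≤ 57 then
    if stack ≠ [] then stack.dropLast else stack
  else stack ++ [char]

def pvStepB (st : Nat × List Char) (char : Char) : Nat × List Char :=
  if 48 ≤ char.toNat ∧ char.toNat ≤ 57 then (st.1 + 1, st.2)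
  else if st.1 > 0 then (st.1 - 1, st.2)
  else (st.1, st.2 ++ [char])

def pvB (l : List Char) : Nat × List Char := l.reverse.foldl pvStepB (0, [])

lemma pvB_cons (c : Char) (t : List Char) : pvB (c :: t) = pvStepB (pvB t) c := by
  simp [pvB, List.foldl_append]

-- dropLast on a guarded pop equals take (length - 1), also when empty
lemma pvStepA_digit (stack : List Char) (c : Char) (h : 48 ≤ c.toNat ∧ c.toNat ≤ 57) :
    pvStepA stack c = stack.take (stack.length - 1) := by
  simp only [pvStepA, if_pos h]
  rcases stack with _ | ⟨a, t⟩
  · simp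
  · simp [List.dropLast_eq_take]

-- key invariant: running A from any stack equals dropping (pvB l).1 elements
-- from the end of that stack and appending B's survivors (in left-to-right order)
lemma pv_key (l : List Char) (st : List Char) :
    l.foldl pvStepA st = st.take (st.length - (pvB l).1) ++ (pvB l).2.reverse := by
  induction l generalizing st with
  | nil => simp [pvB]
  | cons c t ih =>
    rw [List.foldl_cons, ih (pvStepA st c), pvB_cons]
    by_cases hd : 48 ≤ c.toNat ∧ c.toNat ≤ 57
    · rw [pvStepA_digit st c hd]
      simp only [pvStepB, if_pos hd]
      rw [List.take_take]
      congr 2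
      rcases st with _ | ⟨a, u⟩
      · simp
      · simp only [List.length_take, List.length_cons]
        omega
    · have hA : pvStepA st c = st ++ [c] := by simp [pvStepA, hd]
      rw [hA]
      simp only [pvStepB, if_neg hd]
      by_cases hp : (pvB t).1 > 0
      · simp only [if_pos hp]
        have h1 : (st ++ [c]).length - (pvB t).1 = st.length - ((pvB t).1 - 1) := by
          simp only [List.length_append, List.length_cons, List.length_nil]
          omega
        rw [h1, List.take_append_of_le_length (by omega)]
      · have h0 : (pvB t).1 = 0 := by omega
        simp only [h0, Nat.sub_zero]
        rw [List.take_of_length_le (by simp)]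
        simp

theorem pv_main (l : List Char) : l.foldl pvStepA [] = (pvB l).2.reverse := by
  simpa using pv_key l []

-- ===== VERDICT (by name: the statement is the Claim_ definition above) =====
theorem clearDigits_spec : Claim_equal_clearDigits := by
  intro string _
  show clearDigits string = clearDigits_alt string
  simp only [clearDigits, clearDigits_alt]
  rw [show (fun stack char => if 48 ≤ Char.toNat char ∧ Char.toNat char ≤ 57 then
        if stack ≠ [] then List.dropLast stack else stack
      else stack ++ [char]) = pvStepA from rfl]
  rw [pv_main string.toList]
  rfl
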